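-- pv_equiv track=rewrite | github.com/Navruzbek02Hamrayev/list_search | find08_min_count.py | find_min_count
-- ===== SOURCE A (Python) =====
-- def find_min_count(data):
--     """
--     Given the list of numbers, Find count of minimum numbers in the list
--     args:
--         data: list of numbers
--     returns: count of minimum numbers in the list
--     """
--     i=0
--     min=data[0]
--     while i<len(data):
--         if min>data[i]:
--             min=data[i]
--         i+=1
--     return data.count(min)
-- ===== SOURCE B (Python) =====
-- def find_min_count(data):
--     m = data[0]
--     count = 1
--     for x in data[1:]:
--         if m > x:
--             m = x
--             count = 1
--         elif x == m:
--             count += 1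
--     return count
-- ===== Notes on version B (the rewrite author's own statement) =====
-- stated objective: faster
-- what changed: Fuses A's separate min-finding loop and data.count scan into one streaming pass that maintains the running minimum and its tally.
import Mathlib
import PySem

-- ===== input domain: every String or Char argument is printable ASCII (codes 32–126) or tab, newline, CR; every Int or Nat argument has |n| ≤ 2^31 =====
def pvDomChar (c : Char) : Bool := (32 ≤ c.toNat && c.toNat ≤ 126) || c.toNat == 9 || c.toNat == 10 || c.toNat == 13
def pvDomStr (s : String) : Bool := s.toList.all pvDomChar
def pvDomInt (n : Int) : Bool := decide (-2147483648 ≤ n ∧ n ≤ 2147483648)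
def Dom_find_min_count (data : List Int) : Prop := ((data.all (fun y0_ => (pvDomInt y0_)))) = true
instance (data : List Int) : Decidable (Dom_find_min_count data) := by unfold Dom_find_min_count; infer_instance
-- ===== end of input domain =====

-- B fuses A's two passes (find the minimum, then data.count(min)) into one streaming pass
-- maintaining the running minimum and its tally; equality of return values proved on non-empty lists.

-- ===== PORT A =====
-- A's while-loop over indices updating `min`, as a fold over the elements (same comparisons, same order);
-- indexing the first element raises IndexError on the empty list, excluded by Pre_.
def find_min_count (data : List Int) : Int :=
  match data with
  | [] => 0  -- unreachable under Pre_ (Python raises IndexError there)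
  | h :: _ =>
    let m := data.foldl (fun m x => if m > x then x else m) h
    (PySem.List.count data m : Int)

-- ===== PORT B =====
-- single pass over the tail with running minimum m and tally c
def pvLoopB : Int → Int → List Int → Int
  | _, c, [] => c
  | m, c, x :: t =>
    if m > x then pvLoopB x 1 t
    else if x = m then pvLoopB m (c + 1) t
    else pvLoopB m c t

def find_min_count_alt (data : List Int) : Int :=
  match data with
  | [] => 0  -- unreachable under Pre_ (Python raises IndexError there)
  | h :: t => pvLoopB h 1 t

-- ===== PRECONDITION & SPEC =====
-- Pre_ excludes only the empty list, on which Python A raises IndexError when reading the first element.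
def Pre_find_min_count (data : List Int) : Prop := data ≠ []
instance (data : List Int) : Decidable (Pre_find_min_count data) := by unfold Pre_find_min_count; infer_instance
def pvWitness_find_min_count : List Int := [3, 1, 1, 2]

def Spec_find_min_count (data : List Int) (out : Int) : Prop := out = find_min_count_alt data
instance (data : List Int) (out : Int) : Decidable (Spec_find_min_count data out) := by unfold Spec_find_min_count; infer_instance

-- ===== CLAIM (what is proved, stated in full; the proofs are below) =====
def Claim_equal_find_min_count : Prop := ∀ (data : List Int), Dom_find_min_count data → Pre_find_min_count data → Spec_find_min_count data (find_min_count data)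

-- ===== LEMMAS AND PROOFS =====

def pvFmin (m : Int) (t : List Int) : Int := t.foldl (fun m x => if m > x then x else m) m

theorem pvFmin_le (t : List Int) : ∀ m : Int, pvFmin m t ≤ m := by
  induction t with
  | nil => intro m; simp [pvFmin]
  | cons x t ih =>
    intro m
    simp only [pvFmin, List.foldl_cons]
    split_ifs with h
    · exact le_trans (ih x) (le_of_lt h)
    · exact ih m

theorem pvLoopB_eq (t : List Int) : ∀ (m c : Int),
    pvLoopB m c t = (if pvFmin m t = m then c else 0) + (t.count (pvFmin m t) : Int) := by
  induction t with
  | nil => intro m c; simp [pvLoopB, pvFmin]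
  | cons x t ih =>
    intro m c
    simp only [pvLoopB]
    have hcons : pvFmin m (x :: t) = pvFmin (if m > x then x else m) t := by
      simp [pvFmin]
    by_cases h1 : m > x
    · -- m > x : reset
      rw [if_pos h1, ih x 1]
      have hM : pvFmin m (x :: t) = pvFmin x t := by rw [hcons]; simp [h1]
      have hne : pvFmin x t ≠ m := by
        have := pvFmin_le t x; omega
      rw [hM, if_neg hne]
      have hcnt : ((x :: t).count (pvFmin x t) : Int) =
          (if pvFmin x t = x then 1 else 0) + (t.count (pvFmin x t) : Int) := by
        by_cases hx : pvFmin x t = x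
        · simp [hx, List.count_cons_self]; ring
        · rw [List.count_cons_of_ne (by simpa [eq_comm] using hx)]
          simp [hx]
      rw [hcnt]; split_ifs <;> ring
    · rw [if_neg h1]
      by_cases h2 : x = m
      · -- x = m : increment
        rw [if_pos h2]
        subst h2
        rw [ih x (c + 1)]
        have hM : pvFmin x (x :: t) = pvFmin x t := by rw [hcons]; simp
        rw [hM]
        by_cases hx : pvFmin x t = x
        · simp [hx, List.count_cons_self]; ring
        · rw [List.count_cons_of_ne (by simpa [eq_comm] using hx)]
          simp [hx]
      · -- x > m, x ≠ m : skip
        rw [if_neg h2, ih m c]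
        have hM : pvFmin m (x :: t) = pvFmin m t := by rw [hcons]; simp [h1]
        rw [hM]
        have hne : pvFmin m t ≠ x := by
          have := pvFmin_le t m; omega
        rw [List.count_cons_of_ne (by simpa [eq_comm] using hne)]

-- ===== VERDICT (by name: the statement is the Claim_ definition above) =====
theorem find_min_count_spec : Claim_equal_find_min_count := by
  intro data _ hpre
  unfold Spec_find_min_count find_min_count find_min_count_alt
  match data with
  | [] => exact absurd rfl hpre
  | h :: t =>
    simp only [PySem.List.count_eq]
    rw [pvLoopB_eq]
    have hstep : (h :: t).foldl (fun m x => if m > x then x else m) h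
        = pvFmin h t := by simp [pvFmin]
    rw [hstep]
    have hne : pvFmin h t ≤ h := pvFmin_le t h
    by_cases hx : pvFmin h t = h
    · simp [hx, List.count_cons_self]; ring
    · rw [List.count_cons_of_ne (by simpa [eq_comm] using hx)]
      simp [hx]
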